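-- pv_equiv track=rewrite | github.com/gunwoof/algorithm | 구현/프로그래머스_할인행사.py | solution
-- ===== SOURCE A (Python) =====
-- def solution(want, number, discount):
--
--     # want,number로 딕셔너리 만들기(zip 사용)
--     favorite={}
--     for i, j in zip(want,number):
--         favorite[i]=j
--
--
--     cnt=0
--     for i in range(len(discount)-9):
--
--         # discount의 각각 원소의 개수를 체크(set()사용하여 unique뽑기)
--         market={}
--         for j in set(discount[i:i+10]):
--             market[j]=discount[i:i+10].count(j)
--
--         # 비교
--         if favorite==market:
--             cnt+=1
--     answer = cnt
--     return answer
-- ===== SOURCE B (Python) =====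
-- def solution(want, number, discount):
--     favorite = {}
--     for w, n in zip(want, number):
--         favorite[w] = n
--     if len(discount) < 10:
--         return 0
--     window = {}
--     for x in discount[:10]:
--         window[x] = window.get(x, 0) + 1
--     cnt = 1 if favorite == window else 0
--     for out, inc in zip(discount, discount[10:]):
--         window[out] -= 1
--         if window[out] == 0:
--             del window[out]
--         window[inc] = window.get(inc, 0) + 1
--         if favorite == window:
--             cnt += 1
--     return cnt
-- ===== Notes on version B (the rewrite author's own statement) =====
-- stated objective: faster
-- what changed: B maintains one sliding count dict updated by a decrement/increment per window shift (deleting keys that reach 0) instead of A's per-window rebuild of a set plus a count-scan of a fresh 10-slice for every unique element.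
import Mathlib
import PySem

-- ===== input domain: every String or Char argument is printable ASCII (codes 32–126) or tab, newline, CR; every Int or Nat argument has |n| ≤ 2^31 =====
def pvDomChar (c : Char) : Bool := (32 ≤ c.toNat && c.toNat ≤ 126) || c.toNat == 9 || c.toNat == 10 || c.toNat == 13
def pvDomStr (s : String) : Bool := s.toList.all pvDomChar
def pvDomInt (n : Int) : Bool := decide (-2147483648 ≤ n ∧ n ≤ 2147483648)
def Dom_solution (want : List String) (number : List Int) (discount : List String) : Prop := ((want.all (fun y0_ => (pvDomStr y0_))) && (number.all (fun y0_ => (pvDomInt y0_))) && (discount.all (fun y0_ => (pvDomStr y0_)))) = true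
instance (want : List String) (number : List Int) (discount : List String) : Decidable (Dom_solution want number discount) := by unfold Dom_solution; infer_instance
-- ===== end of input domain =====

-- B replaces A's per-window rebuild (set + count over a fresh 10-slice for every position)
-- by ONE sliding count dict updated by a decrement/increment per step; objective: faster (constant factor).

-- Python's `d1 == d2` on dicts (order-independent key→value comparison); exact whenever d1 has
-- no duplicate keys, which holds for every dict either program builds.
def pyDictEq (d e : PySem.Dict String Int) : Bool :=
  d.size == e.size && d.items.all (fun p => e.get? p.1 == some p.2)

-- ===== PORT A =====
def solution (want : List String) (number : List Int) (discount : List String) : Int :=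
  let favorite := (want.zip number).foldl (fun d p => d.insert p.1 p.2) PySem.Dict.empty
  (PySem.List.pyRange 0 ((discount.length : Int) - 9)).foldl (fun cnt i =>
    let market := (PySem.Set.ofList (PySem.List.slice discount (some i) (some (i + 10)))).foldl
      (fun d j => d.insert j ((PySem.List.slice discount (some i) (some (i + 10))).count j : Int))
      PySem.Dict.empty
    if pyDictEq favorite market then cnt + 1 else cnt) 0

-- ===== PORT B =====
def solution_alt (want : List String) (number : List Int) (discount : List String) : Int :=
  let favorite := (want.zip number).foldl (fun d p => d.insert p.1 p.2) PySem.Dict.empty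
  if discount.length < 10 then 0
  else
    let window := (PySem.List.slice discount none (some 10)).foldl
      (fun d x => d.insert x (d.getD x 0 + 1)) PySem.Dict.empty
    let cnt : Int := if pyDictEq favorite window then 1 else 0
    -- `window[out] -= 1`: `out` is always a key of `window`, so `getD out 0` is its value
    let r := (discount.zip (PySem.List.slice discount (some 10) none)).foldl
      (fun (s : PySem.Dict String Int × Int) p =>
        let w1 := s.1.insert p.1 (s.1.getD p.1 0 - 1)
        let w2 := if w1.getD p.1 0 == 0 then w1.erase p.1 else w1
        let w3 := w2.insert p.2 (w2.getD p.2 0 + 1)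
        (w3, if pyDictEq favorite w3 then s.2 + 1 else s.2)) (window, cnt)
    r.2

-- ===== PRECONDITION & SPEC =====
def Spec_solution (want : List String) (number : List Int) (discount : List String) (out : Int) : Prop := out = solution_alt want number discount
instance (want : List String) (number : List Int) (discount : List String) (out : Int) : Decidable (Spec_solution want number discount out) := by unfold Spec_solution; infer_instance

-- ===== CLAIM (what is proved, stated in full; the proofs are below) =====
def Claim_equal_solution : Prop := ∀ (want : List String) (number : List Int) (discount : List String), Dom_solution want number discount → Spec_solution want number discount (solution want number discount)


-- ===== LEMMAS AND PROOFS =====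

-- the key→value function both window dicts realise: the count of k in s, with 0 mapped to "absent"
def trimGet (s : List String) (k : String) : Option Int :=
  if s.count k = 0 then none else some (s.count k)

-- A's per-window market dict for window s
def marketOf (s : List String) : PySem.Dict String Int :=
  (PySem.Set.ofList s).foldl (fun d j => d.insert j ((s.count j : Int))) PySem.Dict.empty

theorem get?_erase (d : PySem.Dict String Int) (k j : String) :
    (d.erase k).get? j = if j = k then none else d.get? j := by
  rcases d with ⟨l⟩
  simp only [PySem.Dict.erase, PySem.Dict.get?]
  induction l with
  | nil => simp
  | cons p t ih =>
    rw [List.filter_cons]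
    cases hpk : (p.1 == k) <;> cases hpj : (p.1 == j) <;> simp_all [beq_iff_eq]

theorem nodup_keys_erase (d : PySem.Dict String Int) (k : String) (h : d.keys.Nodup) :
    (d.erase k).keys.Nodup := by
  rcases d with ⟨l⟩
  simp only [PySem.Dict.erase, PySem.Dict.keys] at *
  exact h.sublist (List.Sublist.map _ List.filter_sublist)

theorem get?_of_contains (d : PySem.Dict String Int) (k : String) (h : d.contains k = true) :
    d.get? k = some (d.getD k 0) := by
  rw [PySem.Dict.contains_eq_isSome_get?] at h
  cases hg : d.get? k with
  | none => rw [hg] at h; simp at h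
  | some v => rw [PySem.Dict.getD_of_get?_eq_some d 0 hg]

theorem pyDictEq_congr (d e e' : PySem.Dict String Int)
    (he : e.keys.Nodup) (he' : e'.keys.Nodup) (h : ∀ k, e.get? k = e'.get? k) :
    pyDictEq d e = pyDictEq d e' := by
  have hsz : e.size = e'.size := by
    have hperm : e.keys.Perm e'.keys := by
      rw [List.perm_ext_iff_of_nodup he he']
      intro a
      constructor <;> intro ha
      · by_contra hb
        have := (PySem.Dict.get?_eq_none_iff_not_mem_keys e' a).2 hb
        rw [← h] at this
        exact ((PySem.Dict.get?_eq_none_iff_not_mem_keys e a).1 this) ha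
      · by_contra hb
        have := (PySem.Dict.get?_eq_none_iff_not_mem_keys e a).2 hb
        rw [h] at this
        exact ((PySem.Dict.get?_eq_none_iff_not_mem_keys e' a).1 this) ha
    have h1 : e.keys.length = e'.keys.length := hperm.length_eq
    simpa [PySem.Dict.keys, PySem.Dict.size] using h1
  unfold pyDictEq
  rw [hsz]
  congr 1
  exact List.all_congr rfl (fun a => by rw [h])

theorem marketOf_keys (s : List String) : (marketOf s).keys = PySem.Set.ofList s := by
  unfold marketOf
  rw [PySem.Dict.keys_foldl_insert, PySem.Dict.keys_empty, PySem.Set.update_nil_left,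
    PySem.Set.ofList_ofList]

theorem marketOf_nodup (s : List String) : (marketOf s).keys.Nodup := by
  rw [marketOf_keys]; exact PySem.Set.nodup_ofList _

theorem marketOf_items (s : List String) :
    (marketOf s).items = (PySem.Set.ofList s).map (fun j => (j, (s.count j : Int))) := by
  unfold marketOf
  have := PySem.Dict.items_foldl_insert_fresh (PySem.Set.ofList s) (fun j => j)
    (fun j => ((s.count j : Int))) PySem.Dict.empty
    (fun a _ => by simp [PySem.Dict.contains_empty]) (by simpa using PySem.Set.nodup_ofList s)
  simpa using this

theorem marketOf_get? (s : List String) (k : String) : (marketOf s).get? k = trimGet s k := by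
  unfold trimGet
  by_cases hk : k ∈ s
  · have hcnt : s.count k ≠ 0 := by simpa [List.count_eq_zero] using hk
    rw [if_neg hcnt]
    rw [PySem.Dict.get?_eq_some_iff_mem_items _ _ _ (marketOf_nodup s), marketOf_items]
    exact List.mem_map_of_mem ((PySem.Set.mem_ofList s k).2 hk)
  · have hcnt : s.count k = 0 := List.count_eq_zero.2 hk
    rw [if_pos hcnt]
    rw [PySem.Dict.get?_eq_none_iff_not_mem_keys, marketOf_keys]
    simpa [PySem.Set.mem_ofList] using hk

theorem counter_nodup (s : List String) :
    (s.foldl (fun d x => d.insert x (d.getD x 0 + 1)) (PySem.Dict.empty : PySem.Dict String Int)).keys.Nodup := by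
  exact PySem.Dict.nodup_keys_foldl_insert s _ PySem.Dict.empty (by simp [PySem.Dict.keys_empty])

theorem counter_get? (s : List String) (k : String) :
    ((s.foldl (fun d x => d.insert x (d.getD x 0 + 1)) (PySem.Dict.empty : PySem.Dict String Int)).get? k) = trimGet s k := by
  have hkeys : (s.foldl (fun d x => d.insert x (d.getD x 0 + 1)) (PySem.Dict.empty : PySem.Dict String Int)).keys
      = PySem.Set.ofList s := by
    rw [PySem.Dict.keys_foldl_insert, PySem.Dict.keys_empty, PySem.Set.update_nil_left]
  have hgd : (s.foldl (fun d x => d.insert x (d.getD x 0 + 1)) (PySem.Dict.empty : PySem.Dict String Int)).getD k 0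
      = (s.count k : Int) := by
    rw [PySem.Dict.getD_foldl_insert_add_one, PySem.Dict.getD_empty]; ring
  unfold trimGet
  by_cases hk : k ∈ s
  · have hcnt : s.count k ≠ 0 := by simpa [List.count_eq_zero] using hk
    rw [if_neg hcnt]
    have hc : (s.foldl (fun d x => d.insert x (d.getD x 0 + 1)) (PySem.Dict.empty : PySem.Dict String Int)).contains k = true := by
      rw [PySem.Dict.contains_iff_mem_keys, hkeys]
      exact (PySem.Set.mem_ofList s k).2 hk
    rw [get?_of_contains _ _ hc, hgd]
  · have hcnt : s.count k = 0 := List.count_eq_zero.2 hk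
    rw [if_pos hcnt, PySem.Dict.get?_eq_none_iff_not_mem_keys, hkeys]
    simpa [PySem.Set.mem_ofList] using hk

theorem step_nodup (W : PySem.Dict String Int) (x y : String) (h : W.keys.Nodup) :
    ((if ((W.insert x (W.getD x 0 - 1)).getD x 0 == 0)
        then (W.insert x (W.getD x 0 - 1)).erase x
        else (W.insert x (W.getD x 0 - 1))).insert y
      ((if ((W.insert x (W.getD x 0 - 1)).getD x 0 == 0)
        then (W.insert x (W.getD x 0 - 1)).erase x
        else (W.insert x (W.getD x 0 - 1))).getD y 0 + 1)).keys.Nodup := by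
  apply PySem.Dict.nodup_keys_insert
  split
  · exact nodup_keys_erase _ _ (PySem.Dict.nodup_keys_insert _ _ _ h)
  · exact PySem.Dict.nodup_keys_insert _ _ _ h

theorem step_get? (W : PySem.Dict String Int) (x y : String) (s9 : List String)
    (hW : ∀ k, W.get? k = trimGet (x :: s9) k) :
    ∀ k, ((if ((W.insert x (W.getD x 0 - 1)).getD x 0 == 0)
            then (W.insert x (W.getD x 0 - 1)).erase x
            else (W.insert x (W.getD x 0 - 1))).insert y
          ((if ((W.insert x (W.getD x 0 - 1)).getD x 0 == 0)
            then (W.insert x (W.getD x 0 - 1)).erase x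
            else (W.insert x (W.getD x 0 - 1))).getD y 0 + 1)).get? k
        = trimGet (s9 ++ [y]) k := by
  have hWx : W.getD x 0 = ((s9.count x : Int) + 1) := by
    rw [PySem.Dict.getD_eq_get?_getD, hW x]
    have : (x :: s9).count x = s9.count x + 1 := by simp [List.count_cons_self]
    simp [trimGet, this]
  have hW1x : (W.insert x (W.getD x 0 - 1)).getD x 0 = (s9.count x : Int) := by
    rw [PySem.Dict.getD_insert_self, hWx]; ring
  have hW2 : ∀ k, (if ((W.insert x (W.getD x 0 - 1)).getD x 0 == 0)
            then (W.insert x (W.getD x 0 - 1)).erase x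
            else (W.insert x (W.getD x 0 - 1))).get? k = trimGet s9 k := by
    intro k
    by_cases hkx : k = x
    · subst hkx
      split
      · next hcond =>
        rw [hW1x] at hcond
        have hc0 : s9.count k = 0 := by simpa using hcond
        rw [get?_erase]
        simp [trimGet, hc0]
      · next hcond =>
        rw [hW1x] at hcond
        have hc0 : s9.count k ≠ 0 := by simpa using hcond
        rw [PySem.Dict.get?_insert_self, hWx]
        simp [trimGet, hc0]
    · have hcount : (x :: s9).count k = s9.count k := by
        rw [List.count_cons]; simp [Ne.symm hkx]
      have hrest : (W.insert x (W.getD x 0 - 1)).get? k = trimGet s9 k := by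
        rw [PySem.Dict.get?_insert_of_ne _ _ hkx, hW k]
        simp [trimGet, hcount]
      split
      · rw [get?_erase, if_neg hkx]; exact hrest
      · exact hrest
  have hW2y : (if ((W.insert x (W.getD x 0 - 1)).getD x 0 == 0)
            then (W.insert x (W.getD x 0 - 1)).erase x
            else (W.insert x (W.getD x 0 - 1))).getD y 0 = (s9.count y : Int) := by
    rw [PySem.Dict.getD_eq_get?_getD, hW2 y]
    by_cases h0 : s9.count y = 0 <;> simp [trimGet, h0]
  intro k
  by_cases hky : k = y
  · subst hky
    rw [PySem.Dict.get?_insert_self, hW2y]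
    have : (s9 ++ [k]).count k = s9.count k + 1 := by simp
    simp [trimGet, this]
  · rw [PySem.Dict.get?_insert_of_ne _ _ hky, hW2 k]
    have : (s9 ++ [y]).count k = s9.count k := by simp [Ne.symm hky]
    simp [trimGet, this]

theorem slide_loop (fav : PySem.Dict String Int) (t : List String) :
    ∀ (W : PySem.Dict String Int) (cnt : Int), W.keys.Nodup →
    (∀ k, W.get? k = trimGet (t.take 10) k) →
    ((t.zip (t.drop 10)).foldl
      (fun (s : PySem.Dict String Int × Int) p =>
        let w1 := s.1.insert p.1 (s.1.getD p.1 0 - 1)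
        let w2 := if w1.getD p.1 0 == 0 then w1.erase p.1 else w1
        let w3 := w2.insert p.2 (w2.getD p.2 0 + 1)
        (w3, if pyDictEq fav w3 then s.2 + 1 else s.2)) (W, cnt)).2
    = cnt + ((List.range (t.length - 10)).countP
        (fun j => pyDictEq fav (marketOf ((t.drop (j + 1)).take 10))) : Int) := by
  induction t with
  | nil => intro W cnt _ _; simp
  | cons x r ih =>
    intro W cnt hnd hW
    by_cases hlen : r.length < 10
    · have hdrop : (x :: r).drop 10 = [] := by
        apply List.drop_eq_nil_of_le
        simp; omega
      have hl : (x :: r).length - 10 = 0 := by simp; omega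
      rw [hdrop, List.zip_nil_right, hl]
      simp
    · rw [Nat.not_lt] at hlen
      have h9 : 9 < r.length := by omega
      have hdrop : (x :: r).drop 10 = r[9] :: r.drop 10 := by
        show r.drop 9 = _
        exact List.drop_eq_getElem_cons h9
      rw [hdrop, List.zip_cons_cons, List.foldl_cons]
      have htake : (x :: r).take 10 = x :: r.take 9 := rfl
      have htake10 : r.take 10 = r.take 9 ++ [r[9]] := by
        rw [List.take_add_one]
        congr
        simp [List.getElem?_eq_getElem h9]
      have hW' : ∀ k, W.get? k = trimGet (x :: r.take 9) k := by
        intro k; rw [hW k, htake]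
      have hstep := step_get? W x r[9] (r.take 9) hW'
      have hstepnd := step_nodup W x r[9] hnd
      -- the state after one step
      have happ := ih ((if ((W.insert x (W.getD x 0 - 1)).getD x 0 == 0)
            then (W.insert x (W.getD x 0 - 1)).erase x
            else (W.insert x (W.getD x 0 - 1))).insert r[9]
          ((if ((W.insert x (W.getD x 0 - 1)).getD x 0 == 0)
            then (W.insert x (W.getD x 0 - 1)).erase x
            else (W.insert x (W.getD x 0 - 1))).getD r[9] 0 + 1))
        (if pyDictEq fav ((if ((W.insert x (W.getD x 0 - 1)).getD x 0 == 0)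
            then (W.insert x (W.getD x 0 - 1)).erase x
            else (W.insert x (W.getD x 0 - 1))).insert r[9]
          ((if ((W.insert x (W.getD x 0 - 1)).getD x 0 == 0)
            then (W.insert x (W.getD x 0 - 1)).erase x
            else (W.insert x (W.getD x 0 - 1))).getD r[9] 0 + 1)) then cnt + 1 else cnt)
        hstepnd (by intro k; rw [hstep k, ← htake10])
      refine Eq.trans happ ?_
      have hmatch : pyDictEq fav ((if ((W.insert x (W.getD x 0 - 1)).getD x 0 == 0)
            then (W.insert x (W.getD x 0 - 1)).erase x
            else (W.insert x (W.getD x 0 - 1))).insert r[9]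
          ((if ((W.insert x (W.getD x 0 - 1)).getD x 0 == 0)
            then (W.insert x (W.getD x 0 - 1)).erase x
            else (W.insert x (W.getD x 0 - 1))).getD r[9] 0 + 1))
          = pyDictEq fav (marketOf (r.take 10)) := by
        apply pyDictEq_congr _ _ _ hstepnd (marketOf_nodup _)
        intro k
        rw [hstep k, marketOf_get?, htake10]
      rw [hmatch]
      have hlsucc : (x :: r).length - 10 = (r.length - 10) + 1 := by simp; omega
      rw [hlsucc, List.range_succ_eq_map]
      have hdrops : ∀ j : ℕ, (x :: r).drop (j + 1) = r.drop j := fun j => rfl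
      simp only [List.countP_map, Function.comp_def, List.drop_succ_cons, List.countP_cons]
      by_cases hm : pyDictEq fav (marketOf (r.take 10)) <;> simp [hm] <;> push_cast <;> ring

def favOf (want : List String) (number : List Int) : PySem.Dict String Int :=
  (want.zip number).foldl (fun d p => d.insert p.1 p.2) PySem.Dict.empty

theorem solution_eq (want : List String) (number : List Int) (discount : List String) :
    solution want number discount
      = ((PySem.List.pyRange 0 ((discount.length : Int) - 9)).countP
          (fun i => pyDictEq (favOf want number)
            (marketOf (PySem.List.slice discount (some i) (some (i + 10))))) : Int) := by
  unfold solution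
  show (PySem.List.pyRange 0 ((discount.length : Int) - 9)).foldl
      (fun cnt i => if pyDictEq (favOf want number)
          (marketOf (PySem.List.slice discount (some i) (some (i + 10)))) then cnt + 1 else cnt) 0 = _
  rw [PySem.List.foldl_if_add_one]
  ring

theorem main_eq (want : List String) (number : List Int) (discount : List String) :
    solution want number discount = solution_alt want number discount := by
  rw [solution_eq]
  unfold favOf
  unfold solution_alt
  by_cases hN : discount.length < 10
  · rw [if_pos hN]
    have h0 : (discount.length : Int) - 9 ≤ 0 := by omega
    rw [PySem.List.pyRange_one_eq_nil h0]
    simp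
  · rw [if_neg hN]
    rw [Nat.not_lt] at hN
    have hslice0 : PySem.List.slice discount none (some 10) = discount.take 10 := by
      rw [PySem.List.slice_to discount (by omega : (0:Int) ≤ 10)]; rfl
    have hwnd : ∀ k, ((PySem.List.slice discount none (some 10)).foldl
        (fun d x => d.insert x (d.getD x 0 + 1)) (PySem.Dict.empty : PySem.Dict String Int)).get? k
          = trimGet (discount.take 10) k := by
      intro k; rw [hslice0]; exact counter_get? _ k
    have hwnodup := counter_nodup (PySem.List.slice discount none (some 10))
    have hslice10 : PySem.List.slice discount (some 10) none = discount.drop 10 := by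
      rw [PySem.List.slice_from discount (by omega : (0:Int) ≤ 10)]; rfl
    simp only [hslice10]
    rw [slide_loop ((want.zip number).foldl (fun d p => d.insert p.1 p.2) PySem.Dict.empty)
      discount _ _ hwnodup hwnd]
    have hm0 : pyDictEq ((want.zip number).foldl (fun d p => d.insert p.1 p.2) PySem.Dict.empty)
        ((PySem.List.slice discount none (some 10)).foldl
          (fun d x => d.insert x (d.getD x 0 + 1)) (PySem.Dict.empty : PySem.Dict String Int))
        = pyDictEq ((want.zip number).foldl (fun d p => d.insert p.1 p.2) PySem.Dict.empty)
            (marketOf (discount.take 10)) := by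
      apply pyDictEq_congr _ _ _ hwnodup (marketOf_nodup _)
      intro k; rw [hwnd k, marketOf_get?]
    rw [hm0]
    have hcast : (discount.length : Int) - 9 = ((discount.length - 9 : Nat) : Int) := by omega
    rw [hcast, PySem.List.pyRange_zero_natCast, List.countP_map]
    have hsucc : discount.length - 9 = (discount.length - 10) + 1 := by omega
    rw [hsucc, List.range_succ_eq_map, List.countP_cons]
    simp only [List.countP_map, Function.comp_def]
    have hsl : ∀ j : ℕ, PySem.List.slice discount (some (j : Int)) (some ((j : Int) + 10))
        = (discount.drop j).take 10 := by
      intro j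
      have hj : ((j : Int) + 10) = ((j + 10 : Nat) : Int) := by push_cast; ring
      rw [hj, PySem.List.slice_natCast]
      congr 1
      omega
    rw [List.countP_congr (fun (a : ℕ) (_ : a ∈ List.range (discount.length - 10)) => by
      show (pyDictEq ((want.zip number).foldl (fun d p => d.insert p.1 p.2) PySem.Dict.empty)
              (marketOf (PySem.List.slice discount (some ((a+1 : Nat) : Int)) (some (((a+1 : Nat) : Int) + 10)))) = true)
        ↔ (pyDictEq ((want.zip number).foldl (fun d p => d.insert p.1 p.2) PySem.Dict.empty)
              (marketOf ((discount.drop (a+1)).take 10)) = true)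
      rw [hsl (a+1)])]
    have h00 := hsl 0
    simp only [Nat.cast_zero, zero_add, List.drop_zero] at h00
    simp only [Nat.cast_zero, zero_add] at *
    rw [h00]
    by_cases hq : pyDictEq ((want.zip number).foldl (fun d p => d.insert p.1 p.2) PySem.Dict.empty)
        (marketOf (discount.take 10)) = true <;>
      simp [hq] <;> push_cast <;> ring

-- ===== VERDICT (by name: the statement is the Claim_ definition above) =====
theorem solution_spec : Claim_equal_solution := by
  intro want number discount _
  unfold Spec_solution
  exact main_eq want number discount
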